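-- pv_equiv track=rewrite | github.com/envomp/2018-Introduction-to-Programming | kt5/exam.py | sum_elements_around_last_three
-- ===== SOURCE A (Python) =====
-- def sum_elements_around_last_three(nums: list) -> int:
--     """
--     Given a list of ints.
--
--     Find sum of elements before and after last 3 in the list.
--
--     If there is no 3 in the list or list is too short
--     or there is no element before or after last 3 return 0.
--
--     Note if 3 is last element in the list you must return
--     sum of elements before and after 3 which is before last.
--
--
--     sum_before_and_after_last_three([1, 3, 7]) -> 8
--     sum_before_and_after_last_three([1, 2, 3, 4, 6, 4, 3, 4, 5, 3, 4, 5, 6]) -> 9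
--     sum_before_and_after_last_three([1, 2, 3, 4, 6, 4, 3, 4, 5, 3, 3, 2, 3]) -> 5
--     sum_before_and_after_last_three([1, 2, 3]) -> 0
--
--     :param nums: given list of ints
--     :return: sum of elements before and after last 3
--     """
--     if len(nums) < 3 or 3 not in nums:
--         return 0
--
--     occurencies = [i for i, x in enumerate(nums) if x == 3]
--     occurencies.reverse()
--
--     for j in range(len(occurencies)):
--         if occurencies[j] == len(nums) - 1 or occurencies[j] == 0:
--             continue
--         else:
--             return nums[occurencies[j] - 1] + nums[occurencies[j] + 1]
--     return 0
-- ===== SOURCE B (Python) =====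
-- def sum_elements_around_last_three(nums: list) -> int:
--     for i in range(len(nums) - 2, 0, -1):
--         if nums[i] == 3:
--             return nums[i - 1] + nums[i + 1]
--     return 0
-- ===== Notes on version B (the rewrite author's own statement) =====
-- stated objective: simpler
-- what changed: Replaces the length/membership guard plus building, reversing and re-scanning a list of all indices of 3 with one direct reverse scan over the interior indices that returns at the first 3.
import Mathlib
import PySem

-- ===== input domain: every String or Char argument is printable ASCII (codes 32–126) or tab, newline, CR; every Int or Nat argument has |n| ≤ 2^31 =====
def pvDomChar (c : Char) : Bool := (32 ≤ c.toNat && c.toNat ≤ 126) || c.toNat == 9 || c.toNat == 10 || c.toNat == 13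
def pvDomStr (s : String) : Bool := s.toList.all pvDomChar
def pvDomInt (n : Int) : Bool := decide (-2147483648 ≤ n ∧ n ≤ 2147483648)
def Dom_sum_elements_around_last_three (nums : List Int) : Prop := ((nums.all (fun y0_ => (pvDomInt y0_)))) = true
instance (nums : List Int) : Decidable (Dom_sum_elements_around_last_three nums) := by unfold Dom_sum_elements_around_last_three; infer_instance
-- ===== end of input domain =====

-- B replaces A's guard + list-of-all-indices-of-3 (built, reversed, re-scanned skipping boundaries)
-- with one direct reverse scan over the interior indices; objective: simpler.

-- ===== PORT A =====
-- the 'for j in range(len(occurencies))' loop, reading occurencies[j]: structural recursion over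
-- the occurrence list; indices taken in the 'else' branch are interior, so nums[i-1]/nums[i+1]
-- are always in range (pyGetD default never used).
def pvALoop (nums : List Int) (nlen : Int) : List Int → Int
  | [] => 0
  | i :: rest =>
      if i = nlen - 1 ∨ i = 0 then pvALoop nums nlen rest
      else PySem.List.pyGetD nums (i - 1) 0 + PySem.List.pyGetD nums (i + 1) 0

def sum_elements_around_last_three (nums : List Int) : Int :=
  if (nums.length : Int) < 3 ∨ ¬ ((3 : Int) ∈ nums) then 0
  else
    let occurencies := ((PySem.List.enumerate nums 0).filter (fun p => p.2 == 3)).map Prod.fst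
    pvALoop nums (nums.length : Int) occurencies.reverse

-- ===== PORT B =====
-- 'for i in range(len(nums)-2, 0, -1)': every i visited is interior, so all three indexings
-- are in range (pyGetD default never used).
def pvBLoop (nums : List Int) : List Int → Int
  | [] => 0
  | i :: rest =>
      if PySem.List.pyGetD nums i 0 == 3 then
        PySem.List.pyGetD nums (i - 1) 0 + PySem.List.pyGetD nums (i + 1) 0
      else pvBLoop nums rest

def sum_elements_around_last_three_alt (nums : List Int) : Int :=
  pvBLoop nums (PySem.List.pyRange ((nums.length : Int) - 2) 0 (-1))

-- ===== PRECONDITION & SPEC =====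
def Spec_sum_elements_around_last_three (nums : List Int) (out : Int) : Prop := out = sum_elements_around_last_three_alt nums
instance (nums : List Int) (out : Int) : Decidable (Spec_sum_elements_around_last_three nums out) := by unfold Spec_sum_elements_around_last_three; infer_instance

-- ===== CLAIM (what is proved, stated in full; the proofs are below) =====
def Claim_equal_sum_elements_around_last_three : Prop := ∀ (nums : List Int), Dom_sum_elements_around_last_three nums → Spec_sum_elements_around_last_three nums (sum_elements_around_last_three nums)

-- ===== LEMMAS AND PROOFS =====

-- "first element of the list that survives, and its neighbour sum" — common shape of both loops
def pvPick (nums : List Int) : List Int → Int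
  | [] => 0
  | i :: _ => PySem.List.pyGetD nums (i - 1) 0 + PySem.List.pyGetD nums (i + 1) 0

theorem pvALoop_eq_pick (nums : List Int) (nlen : Int) (occ : List Int) :
    pvALoop nums nlen occ = pvPick nums (occ.filter (fun i => decide (¬(i = nlen - 1 ∨ i = 0)))) := by
  induction occ with
  | nil => rfl
  | cons i rest ih =>
      rw [List.filter_cons]
      by_cases h : i = nlen - 1 ∨ i = 0
      · rw [if_neg (by simp [h]),
            show pvALoop nums nlen (i :: rest) = pvALoop nums nlen rest from by
              simp [pvALoop, h]]
        exact ih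
      · rw [if_pos (by simp [h]),
            show pvALoop nums nlen (i :: rest)
                = PySem.List.pyGetD nums (i - 1) 0 + PySem.List.pyGetD nums (i + 1) 0 from by
              simp [pvALoop, h]]
        rfl

theorem pvBLoop_eq_pick (nums : List Int) (L : List Int) :
    pvBLoop nums L = pvPick nums (L.filter (fun i => PySem.List.pyGetD nums i 0 == 3)) := by
  induction L with
  | nil => rfl
  | cons i rest ih =>
      rw [List.filter_cons]
      by_cases h : PySem.List.pyGetD nums i 0 = 3
      · rw [if_pos (by simp [h]),
            show pvBLoop nums (i :: rest)
                = PySem.List.pyGetD nums (i - 1) 0 + PySem.List.pyGetD nums (i + 1) 0 from by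
              simp [pvBLoop, h]]
        rfl
      · rw [if_neg (by simp [h]),
            show pvBLoop nums (i :: rest) = pvBLoop nums rest from by simp [pvBLoop, h]]
        exact ih

-- A's occurrence list is the filtered index range
theorem pvOcc_eq (nums : List Int) :
    ((PySem.List.enumerate nums 0).filter (fun p => p.2 == 3)).map Prod.fst
      = (PySem.List.pyRange 0 (nums.length : Int) 1).filter
          (fun j => PySem.List.pyGetD nums j 0 == 3) := by
  rw [PySem.List.enumerate_eq_map_pyRange nums 0]
  rw [List.filter_map, List.map_map]
  simp [Function.comp_def]

-- the filtered full range with boundaries removed is the filtered interior range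
theorem pvRange_filter_eq (nums : List Int) (h3 : 3 ≤ (nums.length : Int)) :
    ((PySem.List.pyRange 0 (nums.length : Int) 1).filter
        (fun j => PySem.List.pyGetD nums j 0 == 3)).filter
        (fun i => decide (¬(i = (nums.length : Int) - 1 ∨ i = 0)))
      = (PySem.List.pyRange 1 ((nums.length : Int) - 1) 1).filter
          (fun j => PySem.List.pyGetD nums j 0 == 3) := by
  set N : Int := (nums.length : Int) with hN
  rw [List.filter_filter]
  have hsplit : PySem.List.pyRange 0 N 1
      = [0] ++ PySem.List.pyRange 1 (N - 1) 1 ++ [N - 1] := by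
    rw [PySem.List.pyRange_one_append 0 (N - 1) N (by omega) (by omega),
        PySem.List.pyRange_one_append 0 1 (N - 1) (by omega) (by omega)]
    have e1 : PySem.List.pyRange 0 1 1 = [0] := by decide
    have e2 : PySem.List.pyRange (N - 1) N 1 = [N - 1] := by
      have := PySem.List.pyRange_one_singleton (N - 1)
      rw [show N - 1 + 1 = N from by omega] at this
      exact this
    rw [e1, e2]
  rw [hsplit, List.filter_append, List.filter_append]
  have hA : ([(0 : Int)]).filter
      (fun a => decide (¬(a = N - 1 ∨ a = 0)) && (PySem.List.pyGetD nums a 0 == 3)) = [] := by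
    simp
  have hB : ([N - 1]).filter
      (fun a => decide (¬(a = N - 1 ∨ a = 0)) && (PySem.List.pyGetD nums a 0 == 3)) = [] := by
    simp
  have hmid : (PySem.List.pyRange 1 (N - 1) 1).filter
      (fun a => decide (¬(a = N - 1 ∨ a = 0)) && (PySem.List.pyGetD nums a 0 == 3))
      = (PySem.List.pyRange 1 (N - 1) 1).filter (fun j => PySem.List.pyGetD nums j 0 == 3) := by
    apply List.filter_congr
    intro x hx
    have hx' := (PySem.List.mem_pyRange_one).1 hx
    have hd : decide (¬(x = N - 1 ∨ x = 0)) = true := by simp; omega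
    rw [hd, Bool.true_and]
  rw [hA, hB, hmid]
  simp

-- every element the interior range indexes is in nums, so no 3 in nums empties the filter
theorem pvNo3_filter_nil (nums : List Int) (h3 : ¬ ((3 : Int) ∈ nums)) :
    (PySem.List.pyRange 1 ((nums.length : Int) - 1) 1).filter
      (fun j => PySem.List.pyGetD nums j 0 == 3) = [] := by
  apply List.filter_eq_nil_iff.2
  intro j hj
  have hj' := (PySem.List.mem_pyRange_one).1 hj
  have hmem : PySem.List.pyGetD nums j 0 ∈ nums := by
    apply PySem.List.pyGetD_mem
    constructor <;> omega
  simp only [beq_iff_eq]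
  intro hEq
  exact h3 (hEq ▸ hmem)

-- B's countdown range is the reversed interior range
theorem pvBRange_eq (nums : List Int) :
    PySem.List.pyRange ((nums.length : Int) - 2) 0 (-1)
      = (PySem.List.pyRange 1 ((nums.length : Int) - 1) 1).reverse := by
  rw [PySem.List.pyRange_neg_one_eq_reverse,
      show (0 : Int) + 1 = 1 from rfl,
      show (nums.length : Int) - 2 + 1 = (nums.length : Int) - 1 from by ring]

-- ===== VERDICT (by name: the statement is the Claim_ definition above) =====
theorem sum_elements_around_last_three_spec : Claim_equal_sum_elements_around_last_three := by
  intro nums _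
  unfold Spec_sum_elements_around_last_three
  unfold sum_elements_around_last_three sum_elements_around_last_three_alt
  rw [pvBRange_eq, pvBLoop_eq_pick, List.filter_reverse]
  by_cases hg : (nums.length : Int) < 3 ∨ ¬ ((3 : Int) ∈ nums)
  · rw [if_pos hg]
    rcases hg with hlen | h3
    · have : PySem.List.pyRange 1 ((nums.length : Int) - 1) 1 = [] :=
        PySem.List.pyRange_one_eq_nil (by omega)
      rw [this]; rfl
    · rw [pvNo3_filter_nil nums h3]; rfl
  · rw [if_neg hg]
    have hlen : 3 ≤ (nums.length : Int) := by
      by_contra h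
      exact hg (Or.inl (by omega))
    rw [pvALoop_eq_pick, pvOcc_eq, List.filter_reverse,
        pvRange_filter_eq nums hlen]
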